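-- pv_equiv track=rewrite | github.com/yves-a/adventOfCode | day3/main.py | find_highest_value
-- ===== SOURCE A (Python) =====
-- def find_highest_value(s):
--     # Part 1
--     l = 0
--     res = 0
--     for r in range(1, len(s)):
--         res = max(res, int(s[l] + s[r]))
--         if int(s[r]) > int(s[l]):
--             l = r
--     return res
-- ===== SOURCE B (Python) =====
-- def find_highest_value(s):
--     if len(s) < 2:
--         return 0
--     digits = [int(c) for c in s]
--     prefmax = []
--     m = 0
--     for d in digits:
--         m = max(m, d)
--         prefmax.append(m)
--     return max(10 * prefmax[r - 1] + digits[r] for r in range(1, len(digits)))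
-- ===== Notes on version B (the rewrite author's own statement) =====
-- stated objective: alternative
-- what changed: A tracks the best left index with a running comparison inside one loop and evaluates int(s[l]+s[r]) by string concatenation; B first converts the string to a digit list, materializes a prefix-maximum table in one pass, then takes the max of 10*prefmax[r-1]+digits[r] in a second arithmetic pass, with an explicit len<2 guard returning 0.
import Mathlib
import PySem

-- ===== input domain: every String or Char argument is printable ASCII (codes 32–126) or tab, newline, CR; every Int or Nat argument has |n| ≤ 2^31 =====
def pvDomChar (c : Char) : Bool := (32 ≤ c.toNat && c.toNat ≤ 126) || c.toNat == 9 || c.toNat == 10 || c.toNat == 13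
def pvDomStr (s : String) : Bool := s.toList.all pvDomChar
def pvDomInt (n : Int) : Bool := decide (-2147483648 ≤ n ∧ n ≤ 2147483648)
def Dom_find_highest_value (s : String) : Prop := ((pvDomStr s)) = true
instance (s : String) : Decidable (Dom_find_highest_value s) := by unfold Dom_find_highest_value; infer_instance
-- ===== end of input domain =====

-- B replaces A's inline running-max-index loop by a two-pass table decomposition:
-- build a prefix-maximum digit table, then take the max of 10*prefmax[r-1]+digit[r]
-- over a second scan (pure arithmetic, no string concatenation). Same cost, plainer data flow.

-- ===== PORT A =====
def find_highest_value (s : String) : Int :=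
  let cs := s.toList
  let st := (PySem.List.pyRange 1 (cs.length : Int)).foldl
    (fun (st : Int × Int) r =>
      let l := st.1
      let res := max st.2 ((PySem.Int.ofChars? [PySem.List.pyGetD cs l ' ', PySem.List.pyGetD cs r ' ']).getD 0)
      let l' := if (PySem.Int.ofChars? [PySem.List.pyGetD cs r ' ']).getD 0 >
                   (PySem.Int.ofChars? [PySem.List.pyGetD cs l ' ']).getD 0 then r else l
      (l', res)) ((0 : Int), (0 : Int))
  st.2

-- ===== PORT B =====
def find_highest_value_alt (s : String) : Int :=
  let cs := s.toList
  if cs.length < 2 then 0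
  else
    let digits := cs.map (fun c => (PySem.Int.ofChars? [c]).getD 0)
    let prefmax := (digits.foldl (fun (st : List Int × Int) d =>
        let m := max st.2 d
        (st.1 ++ [m], m)) (([] : List Int), (0 : Int))).1
    let terms := (PySem.List.pyRange 1 (digits.length : Int)).map
        (fun r => 10 * PySem.List.pyGetD prefmax (r - 1) 0 + PySem.List.pyGetD digits r 0)
    match terms with
    | [] => 0
    | t :: ts => ts.foldl max t

-- ===== PRECONDITION & SPEC =====
-- Pre_ excludes exactly the strings of length ≥ 2 containing a non-digit character:
-- on those Python A raises ValueError (some int() call fails).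
def Pre_find_highest_value (s : String) : Prop :=
  s.toList.length < 2 ∨ s.toList.all PySem.Chars.isdigit = true
instance (s : String) : Decidable (Pre_find_highest_value s) := by
  unfold Pre_find_highest_value; infer_instance

def pvWitness_find_highest_value : String := "8194"

def Spec_find_highest_value (s : String) (out : Int) : Prop := out = find_highest_value_alt s
instance (s : String) (out : Int) : Decidable (Spec_find_highest_value s out) := by
  unfold Spec_find_highest_value; infer_instance

-- ===== CLAIM (what is proved, stated in full; the proofs are below) =====
def Claim_equal_find_highest_value : Prop := ∀ (s : String), Dom_find_highest_value s → Pre_find_highest_value s → Spec_find_highest_value s (find_highest_value s)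

-- ===== LEMMAS AND PROOFS =====

-- digit value of a digit character
def dvC (c : Char) : Int := (c.toNat : Int) - 48

-- running maximum of the first k digit values (seeded with 0; digit values are ≥ 0)
def pmaxD (ds : List Int) (k : Nat) : Int := (ds.take k).foldl max 0

-- the loop body of port A, named so the invariant lemma can speak about it
def stepA (cs : List Char) (st : Int × Int) (r : Int) : Int × Int :=
  let l := st.1
  let res := max st.2 ((PySem.Int.ofChars? [PySem.List.pyGetD cs l ' ', PySem.List.pyGetD cs r ' ']).getD 0)
  let l' := if (PySem.Int.ofChars? [PySem.List.pyGetD cs r ' ']).getD 0 >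
               (PySem.Int.ofChars? [PySem.List.pyGetD cs l ' ']).getD 0 then r else l
  (l', res)

lemma ofChars_digit1 (c : Char) (h : PySem.Chars.isdigit c = true) :
    PySem.Int.ofChars? [c] = some (dvC c) := by
  simp [PySem.Chars.isdigit, Char.le_def, UInt32.le_iff_toNat_le] at h
  have hc : c = Char.ofNat c.toNat := (Char.ofNat_toNat c).symm
  have h1 : 48 ≤ c.toNat := h.1
  have h2 : c.toNat ≤ 57 := h.2
  unfold dvC
  set n := c.toNat with hn; clear_value n
  interval_cases n <;> rw [hc] <;> decide

lemma ofChars_digit2 (c d : Char) (hc : PySem.Chars.isdigit c = true) (hd : PySem.Chars.isdigit d = true) :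
    PySem.Int.ofChars? [c, d] = some (10 * dvC c + dvC d) := by
  simp [PySem.Chars.isdigit, Char.le_def, UInt32.le_iff_toNat_le] at hc hd
  have hcc : c = Char.ofNat c.toNat := (Char.ofNat_toNat c).symm
  have hdd : d = Char.ofNat d.toNat := (Char.ofNat_toNat d).symm
  have h1 : 48 ≤ c.toNat := hc.1
  have h2 : c.toNat ≤ 57 := hc.2
  have h3 : 48 ≤ d.toNat := hd.1
  have h4 : d.toNat ≤ 57 := hd.2
  unfold dvC
  set n := c.toNat with hn; clear_value n
  set m := d.toNat with hm; clear_value m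
  interval_cases n <;> interval_cases m <;> rw [hcc, hdd] <;> decide

lemma dvC_nonneg (c : Char) (h : PySem.Chars.isdigit c = true) : 0 ≤ dvC c := by
  simp [PySem.Chars.isdigit, Char.le_def, UInt32.le_iff_toNat_le] at h
  have h1 : 48 ≤ c.toNat := h.1
  simp [dvC]; omega

lemma pmaxD_nonneg (ds : List Int) (k : Nat) : 0 ≤ pmaxD ds k :=
  (PySem.List.le_foldl_max (ds.take k) 0).1

lemma pmaxD_succ (ds : List Int) (k : Nat) (hk : k < ds.length) :
    pmaxD ds (k + 1) = max (pmaxD ds k) ds[k] := by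
  unfold pmaxD
  rw [List.take_add_one, List.getElem?_eq_getElem hk]
  simp only [Option.toList_some, List.foldl_append, List.foldl_cons, List.foldl_nil]

lemma rangeMap (m : Nat) :
    PySem.List.pyRange 1 ((m + 1 : Nat) : Int) = (List.range m).map (fun (j : Nat) => ((j : Int) + 1)) := by
  induction m with
  | zero => decide
  | succ m ih =>
      have h1 : (1 : Int) ≤ ((m + 1 : Nat) : Int) := by push_cast; omega
      have h2 : ((m + 1 + 1 : Nat) : Int) = ((m + 1 : Nat) : Int) + 1 := by push_cast; ring
      rw [h2, PySem.List.pyRange_one_succ_right h1, ih, List.range_succ, List.map_append]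
      simp

-- Python's max(t, *ts) agrees with a 0-seeded fold when everything is nonnegative
lemma matchMax (ts : List Int) :
    (∀ x ∈ ts, 0 ≤ x) → (match ts with | [] => (0 : Int) | t :: ts' => ts'.foldl max t) = ts.foldl max 0 := by
  cases ts with
  | nil => simp
  | cons t ts' => intro h; simp [List.foldl_cons, max_eq_right (h t (by simp))]

-- characterization of B's prefix-maximum table
lemma pmList (ds : List Int) (acc : List Int) (m : Int) :
    (ds.foldl (fun (st : List Int × Int) d => (st.1 ++ [max st.2 d], max st.2 d)) (acc, m)).1
      = acc ++ (List.range ds.length).map (fun j => (ds.take (j + 1)).foldl max m) := by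
  induction ds generalizing acc m with
  | nil => simp
  | cons d tl ih =>
      rw [List.foldl_cons]
      rw [ih (acc ++ [max m d]) (max m d)]
      rw [List.length_cons, List.range_succ_eq_map]
      simp [List.map_map, Function.comp, List.take_succ_cons, List.append_assoc]

-- invariant of A's loop: the tracked index l holds the running-max digit and res the max term so far
lemma aloop (cs : List Char) (hd : ∀ c ∈ cs, PySem.Chars.isdigit c = true)
    (m : Nat) (hm : m + 1 ≤ cs.length) :
    ∃ l : Nat, l ≤ m ∧
      dvC (cs.getD l ' ') = pmaxD (cs.map dvC) (m + 1) ∧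
      ((List.range m).map (fun (j : Nat) => ((j : Int) + 1))).foldl (stepA cs) (0, 0)
        = ((l : Int),
           ((List.range m).map (fun (j : Nat) =>
              10 * pmaxD (cs.map dvC) (j + 1) + (cs.map dvC).getD (j + 1) 0)).foldl max 0) := by
  induction m with
  | zero =>
      refine ⟨0, le_refl 0, ?_, by simp⟩
      have h0 : 0 < cs.length := by omega
      have hds : (cs.map dvC).take 1 = [dvC cs[0]] := by
        rw [List.take_add_one]
        simp [List.getElem?_eq_getElem (by simpa using h0 : 0 < (cs.map dvC).length)]
      unfold pmaxD
      rw [hds]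
      simp [List.getD, List.getElem?_eq_getElem h0,
            max_eq_right (dvC_nonneg cs[0] (hd _ (cs.getElem_mem h0)))]
  | succ m ih =>
      obtain ⟨l, hlm, hmax, hfold⟩ := ih (by omega)
      have hm1 : m + 1 < cs.length := by omega
      have hl : l < cs.length := by omega
      have hdl : PySem.Chars.isdigit (cs.getD l ' ') = true := by
        rw [List.getD_eq_getElem cs ' ' hl]; exact hd _ (cs.getElem_mem hl)
      have hdm : PySem.Chars.isdigit (cs.getD (m + 1) ' ') = true := by
        rw [List.getD_eq_getElem cs ' ' hm1]; exact hd _ (cs.getElem_mem hm1)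
      have hgd : (cs.map dvC).getD (m + 1) 0 = dvC (cs.getD (m + 1) ' ') := by
        rw [List.getD_eq_getElem cs ' ' hm1,
            List.getD_eq_getElem (cs.map dvC) 0 (by simpa using hm1)]
        simp
      have hpm : pmaxD (cs.map dvC) (m + 1 + 1)
          = max (pmaxD (cs.map dvC) (m + 1)) (dvC (cs.getD (m + 1) ' ')) := by
        rw [pmaxD_succ (cs.map dvC) (m + 1) (by simpa using hm1)]
        rw [List.getD_eq_getElem cs ' ' hm1]
        simp
      rw [List.range_succ, List.map_append, List.map_append, List.foldl_append,
          List.foldl_append, hfold]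
      simp only [List.map_cons, List.map_nil, List.foldl_cons, List.foldl_nil]
      -- evaluate one step of A's loop at r = m+1
      have hcast : ((m : Int) + 1) = ((m + 1 : Nat) : Int) := by push_cast; ring
      unfold stepA
      simp only [hcast, PySem.List.pyGetD_natCast]
      rw [ofChars_digit2 _ _ hdl hdm, ofChars_digit1 _ hdl, ofChars_digit1 _ hdm]
      simp only [Option.getD_some]
      by_cases hc : dvC (cs.getD (m + 1) ' ') > dvC (cs.getD l ' ')
      · refine ⟨m + 1, le_refl _, ?_, ?_⟩
        · rw [hpm]; omega
        · rw [if_pos hc, hmax, hgd]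
      · refine ⟨l, by omega, ?_, ?_⟩
        · rw [hpm, hmax]; omega
        · rw [if_neg hc, hmax, hgd]

lemma smallRange (n : Nat) (h : n < 2) : PySem.List.pyRange 1 (n : Int) = [] := by
  interval_cases n <;> decide

lemma getD_nonneg (ds : List Int) (i : Nat) (h : ∀ x ∈ ds, 0 ≤ x) : 0 ≤ ds.getD i 0 := by
  unfold List.getD
  cases hx : ds[i]? with
  | none => simp
  | some x => simpa using h x (List.mem_of_getElem? hx)

-- port A, written through the named loop body
lemma A_eq (s : String) :
    find_highest_value s
      = ((PySem.List.pyRange 1 (s.toList.length : Int)).foldl (stepA s.toList) (0, 0)).2 := rfl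

-- port B computes the 0-seeded maximum of the arithmetic term list
lemma B_eq (s : String) (hlen : ¬ s.toList.length < 2)
    (hall : ∀ c ∈ s.toList, PySem.Chars.isdigit c = true) :
    find_highest_value_alt s
      = ((List.range (s.toList.length - 1)).map (fun (j : Nat) =>
          10 * pmaxD (s.toList.map dvC) (j + 1) + (s.toList.map dvC).getD (j + 1) 0)).foldl max 0 := by
  unfold find_highest_value_alt
  rw [if_neg hlen]
  have hdig : s.toList.map (fun c => (PySem.Int.ofChars? [c]).getD 0) = s.toList.map dvC :=
    List.map_congr_left (fun c hc => by rw [ofChars_digit1 c (hall c hc)]; rfl)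
  simp only [hdig, pmList (s.toList.map dvC) [] 0, List.nil_append]
  have hn : (s.toList.length - 1) + 1 = s.toList.length := by omega
  have hnc : ((s.toList.map dvC).length : Int) = (((s.toList.length - 1) + 1 : Nat) : Int) := by
    rw [List.length_map, hn]
  rw [hnc, rangeMap, List.map_map]
  have hterms : (List.range (s.toList.length - 1)).map
        ((fun r => 10 * PySem.List.pyGetD
            ((List.range (s.toList.map dvC).length).map (fun j => ((s.toList.map dvC).take (j + 1)).foldl max 0)) (r - 1) 0
          + PySem.List.pyGetD (s.toList.map dvC) r 0) ∘ (fun (j : Nat) => ((j : Int) + 1)))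
      = (List.range (s.toList.length - 1)).map (fun (j : Nat) =>
          10 * pmaxD (s.toList.map dvC) (j + 1) + (s.toList.map dvC).getD (j + 1) 0) := by
    apply List.map_congr_left
    intro j hj
    have hj' : j < s.toList.length - 1 := List.mem_range.mp hj
    have h1 : ((j : Int) + 1 - 1) = ((j : Nat) : Int) := by ring
    have h2 : ((j : Int) + 1) = (((j + 1 : Nat)) : Int) := by push_cast; ring
    simp only [Function.comp_apply]
    rw [h1, h2]
    simp only [PySem.List.pyGetD_natCast]
    rw [PySem.List.getD_map_range _ _ _ _ (by rw [List.length_map]; omega)]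
    rfl
  rw [hterms]
  apply matchMax
  intro x hx
  obtain ⟨j, hj, rfl⟩ := List.mem_map.mp hx
  have hds : ∀ x ∈ s.toList.map dvC, (0 : Int) ≤ x := by
    intro x hx
    obtain ⟨c, hc, rfl⟩ := List.mem_map.mp hx
    exact dvC_nonneg c (hall c hc)
  have := pmaxD_nonneg (s.toList.map dvC) (j + 1)
  have := getD_nonneg (s.toList.map dvC) (j + 1) hds
  omega

-- ===== VERDICT (by name: the statement is the Claim_ definition above) =====
theorem find_highest_value_spec : Claim_equal_find_highest_value := by
  intro s _ hpre
  unfold Spec_find_highest_value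
  by_cases hlen : s.toList.length < 2
  · rw [A_eq, smallRange _ hlen]
    unfold find_highest_value_alt
    rw [if_pos hlen]
    rfl
  · have hall : ∀ c ∈ s.toList, PySem.Chars.isdigit c = true :=
      List.all_eq_true.mp (hpre.resolve_left hlen)
    obtain ⟨l, hlm, hmax, hfold⟩ := aloop s.toList hall (s.toList.length - 1) (by omega)
    rw [A_eq]
    have hn : (s.toList.length - 1) + 1 = s.toList.length := by omega
    have hnc : ((s.toList.length : Nat) : Int) = (((s.toList.length - 1) + 1 : Nat) : Int) := by
      rw [hn]
    rw [hnc, rangeMap, hfold, B_eq s hlen hall]
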